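-- pv_equiv track=rewrite | github.com/pkg-mck/agents-at-scale-ark | scripts/show-help.py | match_targets_to_help
-- ===== SOURCE A (Python) =====
-- from collections import defaultdict
--
-- def match_targets_to_help(targets, help_map):
--     """Match resolved target names to their help text"""
--     matched = {}
--
--     # Build lookup structures
--     # Direct patterns (no variables)
--     direct_patterns = {}
--     # Variable patterns grouped by makefile
--     var_patterns_by_file = defaultdict(list)
--
--     for pattern, (help_text, makefile) in help_map.items():
--         if pattern.startswith('$('):
--             var_patterns_by_file[makefile].append((pattern, help_text))
--         else:
--             direct_patterns[pattern] = (help_text, makefile)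
--
--     # Match targets
--     for target in targets:
--         # Skip filesystem paths
--         if target.startswith('/') or target.startswith('.'):
--             continue
--
--         # Try direct match first
--         if target in direct_patterns:
--             matched[target] = direct_patterns[target]
--             continue
--
--         # Try variable pattern matching
--         if '-' in target:
--             # Split target into base and action (e.g., 'executor-common-build' -> 'executor-common', 'build')
--             parts = target.split('-')
--             action = parts[-1]
--             base_name = '-'.join(parts[:-1])
--
--             # Look through all variable patterns
--             best_match = None
--             for makefile, patterns in var_patterns_by_file.items():
--                 for pattern, help_text in patterns:
--                     # Check if pattern ends with our action
--                     if pattern.endswith('-' + action):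
--                         # Check if the makefile path contains our base name
--                         if base_name in makefile:
--                             best_match = (help_text, makefile)
--                             break
--                 if best_match:
--                     break
--
--             if best_match:
--                 matched[target] = best_match
--
--     return matched
-- ===== SOURCE B (Python) =====
-- def match_targets_to_help(targets, help_map):
--     """Match resolved target names to their help text (pattern-outer matching over an action-indexed candidate table)"""
--     # Partition the help map: direct patterns vs variable patterns grouped by makefile
--     direct_patterns = {p: v for p, v in help_map.items() if not p.startswith('$(')}
--     var_patterns_by_file = {}
--     for pattern, (help_text, makefile) in help_map.items():
--         if pattern.startswith('$('):
--             var_patterns_by_file.setdefault(makefile, []).append((pattern, help_text))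
--
--     # Index the eligible targets (not paths, not directly matched, containing '-') by their action suffix
--     by_action = {}
--     for target in targets:
--         if target.startswith('/') or target.startswith('.') or target in direct_patterns:
--             continue
--         if '-' in target:
--             parts = target.split('-')
--             by_action.setdefault(parts[-1], []).append((target, '-'.join(parts[:-1])))
--
--     # One pass over the variable patterns in makefile-grouped order: first pattern wins per target
--     var_match = {}
--     for makefile, patterns in var_patterns_by_file.items():
--         for pattern, help_text in patterns:
--             for action, candidates in by_action.items():
--                 if pattern.endswith('-' + action):
--                     for target, base_name in candidates:
--                         if target not in var_match and base_name in makefile: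
--                             var_match[target] = (help_text, makefile)
--
--     # Assemble the result in target order
--     matched = {}
--     for target in targets:
--         if target.startswith('/') or target.startswith('.'):
--             continue
--         if target in direct_patterns:
--             matched[target] = direct_patterns[target]
--         elif target in var_match:
--             matched[target] = var_match[target]
--     return matched
-- ===== Notes on version B (the rewrite author's own statement) =====
-- stated objective: alternative
-- what changed: A scans every variable pattern per target (target-outer nested scan with break); B instead indexes eligible targets by their action suffix once, then makes a single pattern-outer pass over the makefile-grouped variable patterns assigning each still-unmatched candidate (first pattern wins), and assembles the result dict in target order.
import Mathlib
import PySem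

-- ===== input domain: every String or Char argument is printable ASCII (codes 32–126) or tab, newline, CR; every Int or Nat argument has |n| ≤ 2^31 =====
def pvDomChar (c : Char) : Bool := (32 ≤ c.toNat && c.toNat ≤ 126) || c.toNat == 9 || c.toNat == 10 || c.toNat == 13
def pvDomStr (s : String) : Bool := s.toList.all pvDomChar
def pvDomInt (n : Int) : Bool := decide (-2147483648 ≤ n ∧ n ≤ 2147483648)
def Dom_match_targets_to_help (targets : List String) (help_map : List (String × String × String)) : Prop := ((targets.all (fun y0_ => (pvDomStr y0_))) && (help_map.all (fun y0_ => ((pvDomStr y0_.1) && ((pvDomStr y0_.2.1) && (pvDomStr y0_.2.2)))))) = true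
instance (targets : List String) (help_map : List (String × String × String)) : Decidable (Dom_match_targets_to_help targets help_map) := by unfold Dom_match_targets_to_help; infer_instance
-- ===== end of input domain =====

-- B replaces A's target-outer scan over all variable patterns by a single pattern-outer pass over
-- an action-indexed table of eligible targets (first pattern wins); alternative decomposition, same results.

-- ===== PORT A =====
-- A-side helper: the partition loop over help_map.items() (direct patterns / variable patterns by makefile)
def pvPartA (hm : List (String × String × String)) :
    PySem.Dict String (String × String) × PySem.Dict String (List (String × String)) :=
  hm.foldl
    (fun st p =>
      if PySem.Str.startswith p.1 "$(" then
        (st.1, st.2.modify p.2.2 [] (fun l => l ++ [(p.1, p.2.1)]))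
      else
        (st.1.insert p.1 (p.2.1, p.2.2), st.2))
    (PySem.Dict.empty, PySem.Dict.empty)

-- A-side helper: the body of A's inner scan 'for pattern, help_text in patterns' ('break' = keep the first hit)
def pvInnerA (action base_name makefile : String) (b : Option (String × String))
    (r : String × String) : Option (String × String) :=
  match b with
  | some _ => b
  | none =>
      if PySem.Str.endswith r.1 ("-" ++ action) && PySem.Str.isIn base_name makefile then
        some (r.2, makefile)
      else none

-- A-side helper: the body of A's outer scan 'for makefile, patterns in var_patterns_by_file.items()'
def pvOuterA (action base_name : String) (best : Option (String × String))
    (q : String × List (String × String)) : Option (String × String) :=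
  match best with
  | some _ => best
  | none => q.2.foldl (pvInnerA action base_name q.1) none

-- A-side helper: the best_match scan
def pvBestA (varf : PySem.Dict String (List (String × String))) (action base_name : String) :
    Option (String × String) :=
  varf.items.foldl (pvOuterA action base_name) none

-- A-side helper: one iteration of A's 'for target in targets' loop
def pvStepA (direct : PySem.Dict String (String × String))
    (varf : PySem.Dict String (List (String × String)))
    (matched : PySem.Dict String (String × String)) (target : String) :
    PySem.Dict String (String × String) :=
  if PySem.Str.startswith target "/" || PySem.Str.startswith target "." then matched
  else
    match direct.get? target with
    | some v => matched.insert target v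
    | none =>
        if PySem.Str.isIn "-" target then
          let parts := (PySem.Str.split? target "-").getD []   -- target.split('-'); sep is never "", so split? is some: exact
          let action := PySem.List.pyGetD parts (-1) ""        -- parts[-1]; split never returns [], so exact
          let base_name := PySem.Str.join "-" (PySem.List.slice parts none (some (-1)))  -- '-'.join(parts[:-1])
          match pvBestA varf action base_name with
          | some bm => matched.insert target bm
          | none => matched
        else matched

def match_targets_to_help (targets : List String) (help_map : List (String × String × String)) :
    List (String × String × String) :=
  let hm := (PySem.Dict.ofList help_map).items   -- help_map is a Python dict
  let st := pvPartA hm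
  (targets.foldl (pvStepA st.1 st.2) PySem.Dict.empty).items

-- ===== PORT B =====
-- B-side helper: direct patterns, a dict comprehension over the non-variable entries
def pvDirectB (hm : List (String × String × String)) : PySem.Dict String (String × String) :=
  (hm.filter (fun p => !PySem.Str.startswith p.1 "$(")).foldl
    (fun d p => d.insert p.1 (p.2.1, p.2.2)) PySem.Dict.empty

-- B-side helper: variable patterns grouped by makefile (setdefault-append)
def pvVarB (hm : List (String × String × String)) : PySem.Dict String (List (String × String)) :=
  hm.foldl
    (fun d p =>
      if PySem.Str.startswith p.1 "$(" then d.modify p.2.2 [] (fun l => l ++ [(p.1, p.2.1)])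
      else d)
    PySem.Dict.empty

-- B-side helper: index the eligible targets by their action suffix
def pvByActionB (direct : PySem.Dict String (String × String)) (targets : List String) :
    PySem.Dict String (List (String × String)) :=
  targets.foldl
    (fun d target =>
      if PySem.Str.startswith target "/" || PySem.Str.startswith target "." || direct.contains target then d
      else if PySem.Str.isIn "-" target then
        let parts := (PySem.Str.split? target "-").getD []   -- target.split('-'); sep never "", exact
        d.modify (PySem.List.pyGetD parts (-1) "") []
          (fun l => l ++ [(target, PySem.Str.join "-" (PySem.List.slice parts none (some (-1))))])
      else d)
    PySem.Dict.empty

-- B-side helper: one pass over the variable patterns in makefile-grouped order; first pattern wins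
def pvVarMatchB (varf : PySem.Dict String (List (String × String)))
    (byAction : PySem.Dict String (List (String × String))) :
    PySem.Dict String (String × String) :=
  varf.items.foldl
    (fun vm q =>
      q.2.foldl
        (fun vm r =>
          byAction.items.foldl
            (fun vm ab =>
              if PySem.Str.endswith r.1 ("-" ++ ab.1) then
                ab.2.foldl
                  (fun vm c =>
                    if !vm.contains c.1 && PySem.Str.isIn c.2 q.1 then vm.insert c.1 (r.2, q.1)
                    else vm)
                  vm
              else vm)
            vm)
        vm)
    PySem.Dict.empty

-- B-side helper: one iteration of the assembly loop
def pvStepB (direct : PySem.Dict String (String × String))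
    (varMatch : PySem.Dict String (String × String))
    (m : PySem.Dict String (String × String)) (target : String) :
    PySem.Dict String (String × String) :=
  if PySem.Str.startswith target "/" || PySem.Str.startswith target "." then m
  else
    match direct.get? target with
    | some v => m.insert target v
    | none =>
        match varMatch.get? target with
        | some v => m.insert target v
        | none => m

def match_targets_to_help_alt (targets : List String) (help_map : List (String × String × String)) :
    List (String × String × String) :=
  let hm := (PySem.Dict.ofList help_map).items   -- help_map is a Python dict
  let direct := pvDirectB hm
  let varMatch := pvVarMatchB (pvVarB hm) (pvByActionB direct targets)
  (targets.foldl (pvStepB direct varMatch) PySem.Dict.empty).items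

-- ===== PRECONDITION & SPEC =====
def Spec_match_targets_to_help (targets : List String) (help_map : List (String × String × String)) (out : List (String × String × String)) : Prop := out = match_targets_to_help_alt targets help_map
instance (targets : List String) (help_map : List (String × String × String)) (out : List (String × String × String)) : Decidable (Spec_match_targets_to_help targets help_map out) := by unfold Spec_match_targets_to_help; infer_instance

-- ===== CLAIM (what is proved, stated in full; the proofs are below) =====
def Claim_equal_match_targets_to_help : Prop := ∀ (targets : List String) (help_map : List (String × String × String)), Dom_match_targets_to_help targets help_map → Spec_match_targets_to_help targets help_map (match_targets_to_help targets help_map)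

-- ===== LEMMAS AND PROOFS =====

-- the strings A computes from a target, and the records/rules both proofs speak about
def pvAct (t : String) : String :=
  PySem.List.pyGetD ((PySem.Str.split? t "-").getD []) (-1) ""
def pvBase (t : String) : String :=
  PySem.Str.join "-" (PySem.List.slice ((PySem.Str.split? t "-").getD []) none (some (-1)))
def pvElig (direct : PySem.Dict String (String × String)) (targets : List String) :
    List (String × String × String) :=
  targets.filterMap (fun t =>
    if PySem.Str.startswith t "/" || PySem.Str.startswith t "." || direct.contains t then none
    else if PySem.Str.isIn "-" t then some (pvAct t, t, pvBase t) else none)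
def pvRules (varf : PySem.Dict String (List (String × String))) : List (String × String × String) :=
  varf.items.flatMap (fun q => q.2.map (fun r => (r.1, r.2, q.1)))
def pvCondA (act base : String) (rho : String × String × String) : Bool :=
  PySem.Str.endswith rho.1 ("-" ++ act) && PySem.Str.isIn base rho.2.2
def pvMatchB (elig : List (String × String × String)) (rho : String × String × String) (x : String) : Bool :=
  elig.any (fun e => e.2.1 == x && pvCondA e.1 e.2.2 rho)
def pvStepRule (byAction : PySem.Dict String (List (String × String)))
    (vm : PySem.Dict String (String × String)) (rho : String × String × String) :
    PySem.Dict String (String × String) :=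
  byAction.items.foldl
    (fun vm ab =>
      if PySem.Str.endswith rho.1 ("-" ++ ab.1) then
        ab.2.foldl
          (fun vm c =>
            if !vm.contains c.1 && PySem.Str.isIn c.2 rho.2.2 then vm.insert c.1 (rho.2.1, rho.2.2)
            else vm)
          vm
      else vm)
    vm
def pvCondB (byAction : PySem.Dict String (List (String × String)))
    (rho : String × String × String) (x : String) : Bool :=
  byAction.items.any (fun ab =>
    PySem.Str.endswith rho.1 ("-" ++ ab.1)
      && ab.2.any (fun c => c.1 == x && PySem.Str.isIn c.2 rho.2.2))

-- A's pair-fold partition computes B's two dicts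
theorem pvPartA_go (hm : List (String × String × String))
    (d : PySem.Dict String (String × String)) (v : PySem.Dict String (List (String × String))) :
    hm.foldl (fun st p =>
      if PySem.Str.startswith p.1 "$(" then
        (st.1, st.2.modify p.2.2 [] (fun l => l ++ [(p.1, p.2.1)]))
      else
        (st.1.insert p.1 (p.2.1, p.2.2), st.2)) (d, v)
      = ((hm.filter (fun p => !PySem.Str.startswith p.1 "$(")).foldl
           (fun d p => d.insert p.1 (p.2.1, p.2.2)) d,
         hm.foldl (fun d p => if PySem.Str.startswith p.1 "$(" then d.modify p.2.2 [] (fun l => l ++ [(p.1, p.2.1)]) else d) v) := by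
  induction hm generalizing d v with
  | nil => rfl
  | cons p hm ih =>
    simp only [List.foldl_cons, List.filter_cons]
    by_cases h : PySem.Str.startswith p.1 "$(" = true
    · rw [h]; simpa using ih d _
    · rw [Bool.not_eq_true] at h; rw [h]; simpa using ih _ v

theorem pvPartA_eq (hm : List (String × String × String)) :
    pvPartA hm = (pvDirectB hm, pvVarB hm) :=
  pvPartA_go hm PySem.Dict.empty PySem.Dict.empty

-- A's inner scan, characterised as find?
theorem pvInnerA_fold (act base mk : String) (cs : List (String × String)) (b : Option (String × String)) :
    cs.foldl (pvInnerA act base mk) b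
      = b.or ((cs.find? (fun r => PySem.Str.endswith r.1 ("-" ++ act) && PySem.Str.isIn base mk)).map
          (fun r => (r.2, mk))) := by
  induction cs generalizing b with
  | nil => cases b <;> rfl
  | cons c cs ih =>
    cases b with
    | some x => simp only [List.foldl_cons]; rw [ih]; rfl
    | none =>
      simp only [List.foldl_cons, List.find?_cons]
      have hinner : pvInnerA act base mk none c
          = if (PySem.Str.endswith c.1 ("-" ++ act) && PySem.Str.isIn base mk) then some (c.2, mk) else none := rfl
      by_cases h : (PySem.Str.endswith c.1 ("-" ++ act) && PySem.Str.isIn base mk) = true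
      · rw [ih, hinner, h]; rfl
      · rw [Bool.not_eq_true] at h; rw [ih, hinner, h]; rfl

-- A's best_match scan is find? over the flattened rule list
theorem pvBestA_go (act base : String) (items : List (String × List (String × String)))
    (b : Option (String × String)) :
    items.foldl (pvOuterA act base) b
      = b.or (((items.flatMap (fun q => q.2.map (fun r => (r.1, r.2, q.1)))).find?
          (pvCondA act base)).map (fun rho => (rho.2.1, rho.2.2))) := by
  induction items generalizing b with
  | nil => cases b <;> rfl
  | cons q items ih =>
    cases b with
    | some x => simp only [List.foldl_cons]; rw [ih]; rfl
    | none =>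
      simp only [List.foldl_cons, List.flatMap_cons, List.find?_append]
      have hout : pvOuterA act base none q = q.2.foldl (pvInnerA act base q.1) none := rfl
      rw [hout, pvInnerA_fold, ih, List.find?_map]
      cases hf : q.2.find? (fun r => PySem.Str.endswith r.1 ("-" ++ act) && PySem.Str.isIn base q.1) with
      | none =>
        have h2 : q.2.find? ((pvCondA act base) ∘ (fun r => (r.1, r.2, q.1))) = none := hf
        rw [h2]; rfl
      | some r =>
        have h2 : q.2.find? ((pvCondA act base) ∘ (fun r => (r.1, r.2, q.1))) = some r := hf
        rw [h2]; rfl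

theorem pvBestA_eq (varf : PySem.Dict String (List (String × String))) (act base : String) :
    pvBestA varf act base
      = ((pvRules varf).find? (pvCondA act base)).map (fun rho => (rho.2.1, rho.2.2)) := by
  unfold pvBestA pvRules
  rw [pvBestA_go, Option.none_or]

-- B's byAction loop is a modify-fold over the eligible records
theorem pvByActionB_go (direct : PySem.Dict String (String × String)) (targets : List String)
    (d : PySem.Dict String (List (String × String))) :
    targets.foldl
      (fun d target =>
        if PySem.Str.startswith target "/" || PySem.Str.startswith target "." || direct.contains target then d
        else if PySem.Str.isIn "-" target then
          let parts := (PySem.Str.split? target "-").getD []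
          d.modify (PySem.List.pyGetD parts (-1) "") []
            (fun l => l ++ [(target, PySem.Str.join "-" (PySem.List.slice parts none (some (-1))))])
        else d)
      d
      = (pvElig direct targets).foldl (fun d p => d.modify p.1 [] (fun l => l ++ [p.2])) d := by
  induction targets generalizing d with
  | nil => rfl
  | cons t ts ih =>
    simp only [List.foldl_cons, pvElig, List.filterMap_cons]
    split_ifs with h1 h2
    · exact ih d
    · exact ih _
    · exact ih d

theorem pvByActionB_eq (direct : PySem.Dict String (String × String)) (targets : List String) :
    pvByActionB direct targets
      = (pvElig direct targets).foldl (fun d p => d.modify p.1 [] (fun l => l ++ [p.2]))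
          PySem.Dict.empty :=
  pvByActionB_go direct targets PySem.Dict.empty

theorem pvBucket_eq (direct : PySem.Dict String (String × String)) (targets : List String) (a : String) :
    (pvByActionB direct targets).getD a []
      = ((pvElig direct targets).filter (fun e => e.1 == a)).map (fun e => e.2) := by
  rw [pvByActionB_eq, PySem.Dict.getD_foldl_modify_append]
  simp [PySem.Dict.getD_empty]

theorem pvByActionB_items (direct : PySem.Dict String (String × String)) (targets : List String) :
    (pvByActionB direct targets).items
      = (PySem.Set.ofList ((pvElig direct targets).map (fun e => e.1))).map
          (fun a => (a, ((pvElig direct targets).filter (fun e => e.1 == a)).map (fun e => e.2))) := by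
  have hnd : (pvByActionB direct targets).keys.Nodup := by
    rw [pvByActionB_eq]
    exact PySem.Dict.nodup_keys_foldl_modify_key (pvElig direct targets)
      (fun (p : String × String × String) => p.1) ([] : List (String × String))
      (fun _ (p : String × String × String) (l : List (String × String)) => l ++ [p.2]) _
      (by simp [PySem.Dict.keys_empty])
  have hkeys : (pvByActionB direct targets).keys
      = PySem.Set.ofList ((pvElig direct targets).map (fun e => e.1)) := by
    rw [pvByActionB_eq]
    rw [PySem.Dict.keys_foldl_modify_key (pvElig direct targets)
      (fun (p : String × String × String) => p.1) ([] : List (String × String))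
      (fun _ (p : String × String × String) (l : List (String × String)) => l ++ [p.2])]
    simp [PySem.Dict.keys_empty, PySem.Set.update_nil_left]
  rw [PySem.Dict.items_eq_map_keys _ hnd [], hkeys]
  exact List.map_congr_left (fun a _ => by rw [pvBucket_eq])

-- the innermost insert-if-unmatched fold, characterised by get?
theorem pvInnerFold_get? (h mkf : String) (cs : List (String × String))
    (vm : PySem.Dict String (String × String)) (x : String) :
    ((cs.foldl (fun vm c => if !vm.contains c.1 && PySem.Str.isIn c.2 mkf then vm.insert c.1 (h, mkf) else vm) vm).get? x)
      = (vm.get? x).or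
          (if cs.any (fun c => c.1 == x && PySem.Str.isIn c.2 mkf) then some (h, mkf) else none) := by
  induction cs generalizing vm with
  | nil => simp
  | cons c cs ih =>
    simp only [List.foldl_cons, List.any_cons]
    by_cases hc : (!vm.contains c.1 && PySem.Str.isIn c.2 mkf) = true
    · rw [if_pos hc, ih]
      rw [Bool.and_eq_true, Bool.not_eq_true'] at hc
      obtain ⟨hcon, hin⟩ := hc
      have hnone : vm.get? c.1 = none := by
        have h2 := PySem.Dict.contains_eq_isSome_get? vm c.1
        rw [hcon] at h2
        exact Option.not_isSome_iff_eq_none.mp (by rw [← h2]; simp)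
      by_cases hx : x = c.1
      · rw [hx, hnone, PySem.Dict.get?_insert]
        simp only [beq_self_eq_true, Bool.true_and, hin, Bool.true_or, reduceIte,
          Option.some_or, Option.none_or]
      · rw [PySem.Dict.get?_insert, if_neg hx]
        have hbeq : (c.1 == x) = false := beq_eq_false_iff_ne.mpr (fun hh => hx hh.symm)
        simp only [hbeq, Bool.false_and, Bool.false_or]
    · rw [if_neg hc, ih]
      rw [Bool.not_eq_true, Bool.and_eq_false_iff] at hc
      cases hv : vm.get? x with
      | some u => simp only [Option.some_or]
      | none =>
        have hcx : (c.1 == x && PySem.Str.isIn c.2 mkf) = false := by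
          by_cases hx : c.1 = x
          · rcases hc with h1 | h2
            · rw [Bool.not_eq_false'] at h1
              exfalso
              have h2 := PySem.Dict.contains_eq_isSome_get? vm c.1
              rw [h1, hx, hv] at h2
              simp at h2
            · simp only [h2, Bool.and_false]
          · simp only [beq_eq_false_iff_ne.mpr hx, Bool.false_and]
        simp only [Option.none_or, hcx, Bool.false_or]

theorem pvOrIf {γ : Type} (o : Option γ) (p q : Bool) (w : γ) :
    (o.or (if p then some w else none)).or (if q then some w else none)
      = o.or (if (p || q) then some w else none) := by
  cases o <;> cases p <;> cases q <;> rfl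

-- one rule's pass over all action buckets
theorem pvStepRule_go (rho : String × String × String)
    (items : List (String × List (String × String)))
    (vm : PySem.Dict String (String × String)) (x : String) :
    ((items.foldl
        (fun vm ab =>
          if PySem.Str.endswith rho.1 ("-" ++ ab.1) then
            ab.2.foldl
              (fun vm c =>
                if !vm.contains c.1 && PySem.Str.isIn c.2 rho.2.2 then vm.insert c.1 (rho.2.1, rho.2.2)
                else vm)
              vm
          else vm)
        vm).get? x)
      = (vm.get? x).or
          (if items.any (fun ab =>
                PySem.Str.endswith rho.1 ("-" ++ ab.1)
                  && ab.2.any (fun c => c.1 == x && PySem.Str.isIn c.2 rho.2.2)) then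
              some (rho.2.1, rho.2.2)
            else none) := by
  induction items generalizing vm with
  | nil => simp
  | cons ab rest ih =>
    simp only [List.foldl_cons, List.any_cons]
    by_cases he : PySem.Str.endswith rho.1 ("-" ++ ab.1) = true
    · rw [if_pos he, ih, pvInnerFold_get? rho.2.1 rho.2.2 ab.2 vm x, pvOrIf]
      simp only [he, Bool.true_and]
    · rw [if_neg he, ih]
      rw [Bool.not_eq_true] at he
      simp only [he, Bool.false_and, Bool.false_or]

theorem pvStepRule_get? (byAction : PySem.Dict String (List (String × String)))
    (vm : PySem.Dict String (String × String)) (rho : String × String × String) (x : String) :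
    (pvStepRule byAction vm rho).get? x
      = (vm.get? x).or (if pvCondB byAction rho x then some (rho.2.1, rho.2.2) else none) :=
  pvStepRule_go rho byAction.items vm x

-- B's nested pattern loops are a fold of pvStepRule over the flattened rules
theorem pvFoldFlat {γ : Type} (g : γ → (String × String × String) → γ)
    (l : List (String × List (String × String))) (d : γ) :
    l.foldl (fun d q => q.2.foldl (fun d r => g d (r.1, r.2, q.1)) d) d
      = (l.flatMap (fun q => q.2.map (fun r => (r.1, r.2, q.1)))).foldl g d := by
  induction l generalizing d with
  | nil => rfl
  | cons q l ih =>
    simp only [List.foldl_cons, List.flatMap_cons, List.foldl_append, List.foldl_map]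
    exact ih _

theorem pvVarMatchB_eq_foldRules (varf byAction : PySem.Dict String (List (String × String))) :
    pvVarMatchB varf byAction = (pvRules varf).foldl (pvStepRule byAction) PySem.Dict.empty := by
  unfold pvVarMatchB pvRules
  exact pvFoldFlat (pvStepRule byAction) varf.items PySem.Dict.empty

-- the fold over all rules, characterised by get?
theorem pvFoldRules_get? (byAction : PySem.Dict String (List (String × String)))
    (rules : List (String × String × String)) (vm : PySem.Dict String (String × String)) (x : String) :
    ((rules.foldl (pvStepRule byAction) vm).get? x)
      = (vm.get? x).or ((rules.find? (fun rho => pvCondB byAction rho x)).map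
          (fun rho => (rho.2.1, rho.2.2))) := by
  induction rules generalizing vm with
  | nil => simp
  | cons rho rules ih =>
    simp only [List.foldl_cons]
    rw [ih, pvStepRule_get?]
    by_cases hc : pvCondB byAction rho x = true
    · rw [List.find?_cons_of_pos (p := fun rho => pvCondB byAction rho x) hc]
      simp only [hc, reduceIte, Option.or_assoc, Option.some_or, Option.map_some]
    · rw [List.find?_cons_of_neg (p := fun rho => pvCondB byAction rho x) hc]
      rw [Bool.not_eq_true] at hc
      simp only [hc, Bool.false_eq_true, reduceIte, Option.or_none]
  
-- the rule condition B tests through the byAction index, rephrased over the eligible records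
theorem pvCondB_eq (direct : PySem.Dict String (String × String)) (targets : List String)
    (rho : String × String × String) (x : String) :
    pvCondB (pvByActionB direct targets) rho x = pvMatchB (pvElig direct targets) rho x := by
  rw [Bool.eq_iff_iff]
  unfold pvCondB pvMatchB pvCondA
  rw [pvByActionB_items]
  simp only [List.any_eq_true, Bool.and_eq_true]
  constructor
  · rintro ⟨ab, hab, hend, c, hc, hcx, hin⟩
    obtain ⟨a, _, rfl⟩ := List.mem_map.mp hab
    obtain ⟨e, he, rfl⟩ := List.mem_map.mp hc
    have hef := List.mem_filter.mp he
    have hea : e.1 = a := beq_iff_eq.mp hef.2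
    refine ⟨e, hef.1, hcx, ?_, hin⟩
    rw [hea]
    exact hend
  · rintro ⟨e, he, hex, hend, hin⟩
    refine ⟨(e.1, ((pvElig direct targets).filter (fun e' => e'.1 == e.1)).map (fun e' => e'.2)),
      ?_, hend, e.2, ?_, hex, hin⟩
    · exact List.mem_map.mpr ⟨e.1,
        (PySem.Set.mem_ofList _ _).mpr (List.mem_map_of_mem he), rfl⟩
    · exact List.mem_map.mpr ⟨e, List.mem_filter.mpr ⟨he, beq_self_eq_true e.1⟩, rfl⟩

-- membership in the eligible list
theorem pvMem_elig (direct : PySem.Dict String (String × String)) (targets : List String)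
    (e : String × String × String) :
    e ∈ pvElig direct targets
      ↔ e.2.1 ∈ targets
          ∧ (PySem.Str.startswith e.2.1 "/" || PySem.Str.startswith e.2.1 "."
              || direct.contains e.2.1) = false
          ∧ PySem.Str.isIn "-" e.2.1 = true
          ∧ e = (pvAct e.2.1, e.2.1, pvBase e.2.1) := by
  unfold pvElig
  rw [List.mem_filterMap]
  constructor
  · rintro ⟨t, ht, hfe⟩
    by_cases h1 : (PySem.Str.startswith t "/" || PySem.Str.startswith t "." || direct.contains t) = true
    · rw [if_pos h1] at hfe; exact absurd hfe (by simp)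
    · rw [Bool.not_eq_true] at h1
      rw [if_neg (by rw [h1]; exact Bool.false_ne_true)] at hfe
      by_cases h2 : PySem.Str.isIn "-" t = true
      · rw [if_pos h2] at hfe
        have he : e = (pvAct t, t, pvBase t) := (Option.some_inj.mp hfe).symm
        have ht21 : e.2.1 = t := by rw [he]
        rw [ht21]
        exact ⟨ht, h1, h2, by rw [he]⟩
      · rw [Bool.not_eq_true] at h2
        rw [if_neg (by rw [h2]; exact Bool.false_ne_true)] at hfe
        exact absurd hfe (by simp)
  · rintro ⟨ht, h1, h2, he⟩
    refine ⟨e.2.1, ht, ?_⟩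
    rw [if_neg (by rw [h1]; exact Bool.false_ne_true), if_pos h2]
    exact he ▸ rfl

-- for an eligible target, B's condition is A's condition
theorem pvMatchB_of_elig (direct : PySem.Dict String (String × String)) (targets : List String)
    (rho : String × String × String) (x : String)
    (hx : x ∈ targets)
    (hskip : (PySem.Str.startswith x "/" || PySem.Str.startswith x "." || direct.contains x) = false)
    (hdash : PySem.Str.isIn "-" x = true) :
    pvMatchB (pvElig direct targets) rho x = pvCondA (pvAct x) (pvBase x) rho := by
  rw [Bool.eq_iff_iff]
  unfold pvMatchB
  simp only [List.any_eq_true, Bool.and_eq_true, beq_iff_eq]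
  constructor
  · rintro ⟨e, he, hex, hc⟩
    have hshape := ((pvMem_elig direct targets e).mp he).2.2.2
    rw [hshape] at hc
    simp only at hc
    rwa [hex] at hc
  · intro hc
    refine ⟨(pvAct x, x, pvBase x), ?_, rfl, hc⟩
    exact (pvMem_elig direct targets (pvAct x, x, pvBase x)).mpr ⟨hx, hskip, hdash, rfl⟩

-- a target without '-' never matches any rule
theorem pvMatchB_of_no_dash (direct : PySem.Dict String (String × String)) (targets : List String)
    (rho : String × String × String) (x : String) (hdash : PySem.Str.isIn "-" x = false) :
    pvMatchB (pvElig direct targets) rho x = false := by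
  unfold pvMatchB
  rw [List.any_eq_false]
  rintro e he
  have hm := (pvMem_elig direct targets e).mp he
  intro hcontra
  rw [Bool.and_eq_true, beq_iff_eq] at hcontra
  rw [hcontra.1] at hm
  rw [hm.2.2.1] at hdash
  exact Bool.noConfusion hdash

-- B's var_match lookup, fully characterised
theorem pvVarMatchB_get? (direct : PySem.Dict String (String × String)) (targets : List String)
    (varf : PySem.Dict String (List (String × String))) (x : String) :
    (pvVarMatchB varf (pvByActionB direct targets)).get? x
      = ((pvRules varf).find? (fun rho => pvMatchB (pvElig direct targets) rho x)).map
          (fun rho => (rho.2.1, rho.2.2)) := by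
  rw [pvVarMatchB_eq_foldRules, pvFoldRules_get?, PySem.Dict.get?_empty, Option.none_or]
  have hfun : (fun rho => pvCondB (pvByActionB direct targets) rho x)
      = (fun rho => pvMatchB (pvElig direct targets) rho x) :=
    funext (fun rho => pvCondB_eq direct targets rho x)
  rw [hfun]

-- the two per-target loop bodies agree on every member of targets
theorem pvStep_eq (hm : List (String × String × String)) (targets : List String)
    (m : PySem.Dict String (String × String)) (t : String) (ht : t ∈ targets) :
    pvStepA (pvDirectB hm) (pvVarB hm) m t
      = pvStepB (pvDirectB hm) (pvVarMatchB (pvVarB hm) (pvByActionB (pvDirectB hm) targets)) m t := by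
  unfold pvStepA pvStepB
  by_cases hs : (PySem.Str.startswith t "/" || PySem.Str.startswith t ".") = true
  · rw [if_pos hs, if_pos hs]
  · rw [Bool.not_eq_true] at hs
    have hcond : ¬ ((PySem.Str.startswith t "/" || PySem.Str.startswith t ".") = true) := by
      rw [hs]; exact Bool.false_ne_true
    rw [if_neg hcond, if_neg hcond]
    cases hd : (pvDirectB hm).get? t with
    | some v => rfl
    | none =>
      have hcon : (pvDirectB hm).contains t = false := by
        rw [PySem.Dict.contains_eq_isSome_get?, hd]; rfl
      have hskip : (PySem.Str.startswith t "/" || PySem.Str.startswith t "."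
          || (pvDirectB hm).contains t) = false := by
        rw [Bool.or_eq_false_iff]
        exact ⟨hs, hcon⟩
      rw [pvVarMatchB_get? (pvDirectB hm) targets (pvVarB hm) t]
      by_cases hdash : PySem.Str.isIn "-" t = true
      · rw [if_pos hdash]
        have hfun : (fun rho => pvMatchB (pvElig (pvDirectB hm) targets) rho t)
            = pvCondA (pvAct t) (pvBase t) :=
          funext (fun rho => pvMatchB_of_elig (pvDirectB hm) targets rho t ht hskip hdash)
        rw [hfun]
        show (match pvBestA (pvVarB hm) (pvAct t) (pvBase t) with
              | some bm => m.insert t bm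
              | none => m)
            = (match ((pvRules (pvVarB hm)).find? (pvCondA (pvAct t) (pvBase t))).map
                  (fun rho => (rho.2.1, rho.2.2)) with
              | some v => m.insert t v
              | none => m)
        rw [pvBestA_eq]
      · rw [Bool.not_eq_true] at hdash
        have hcond2 : ¬ (PySem.Str.isIn "-" t = true) := by
          rw [hdash]; exact Bool.false_ne_true
        rw [if_neg hcond2]
        have hfun : (fun rho => pvMatchB (pvElig (pvDirectB hm) targets) rho t)
            = (fun _ => false) :=
          funext (fun rho => pvMatchB_of_no_dash (pvDirectB hm) targets rho t hdash)
        rw [hfun]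
        have hnone : (pvRules (pvVarB hm)).find? (fun _ => false) = none := by simp
        rw [hnone]
        rfl

-- ===== VERDICT (by name: the statement is the Claim_ definition above) =====
theorem match_targets_to_help_spec : Claim_equal_match_targets_to_help := by
  intro targets help_map _
  unfold Spec_match_targets_to_help match_targets_to_help match_targets_to_help_alt
  show (targets.foldl
      (pvStepA (pvPartA ((PySem.Dict.ofList help_map).items)).1
        (pvPartA ((PySem.Dict.ofList help_map).items)).2) PySem.Dict.empty).items
    = (targets.foldl
        (pvStepB (pvDirectB ((PySem.Dict.ofList help_map).items))
          (pvVarMatchB (pvVarB ((PySem.Dict.ofList help_map).items))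
            (pvByActionB (pvDirectB ((PySem.Dict.ofList help_map).items)) targets)))
        PySem.Dict.empty).items
  rw [pvPartA_eq]
  exact congrArg PySem.Dict.items
    (PySem.List.foldl_congr_mem targets _ _ _
      (fun m t ht => pvStep_eq ((PySem.Dict.ofList help_map).items) targets m t ht))
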